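-- pv_equiv track=rewrite | github.com/yifeiy3/STLTree | extensions/ConflictVerfication.py | _convertValueMap
-- ===== SOURCE A (Python) =====
-- def _convertValueMap(devicedict):
--     '''
--         create a dictionary that maps discrete device states values to indices since z3 solver can not take in strings
--     '''
--     valuemap = {}
--     for devices in devicedict.keys():
--         d = {}
--         continuous = False
--         for i in range(len(devicedict[devices])):
--             stateval = devicedict[devices][i]
--             try:
--                 int(stateval)
--             except ValueError:
--                 d[stateval] = i
--             else: #dont care about continuous variables
--                 continuous = True
--                 break
--         if not continuous:
--             valuemap[devices] = d
--     return valuemap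
-- ===== SOURCE B (Python) =====
-- def _isint(s):
--     try:
--         int(s)
--         return True
--     except ValueError:
--         return False
--
-- def _convertValueMap(devicedict):
--     valuemap = {}
--     for device, states in devicedict.items():
--         if not any(_isint(s) for s in states):
--             valuemap[device] = {s: i for i, s in enumerate(states)}
--     return valuemap
-- ===== Notes on version B (the rewrite author's own statement) =====
-- stated objective: simpler
-- what changed: Replaces A's single early-breaking index loop that builds a partial dict and then discards it on break with a separate continuity test (any state parses as int) followed by a dict comprehension over enumerate; the try/except is isolated in a tiny _isint helper.
import Mathlib
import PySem

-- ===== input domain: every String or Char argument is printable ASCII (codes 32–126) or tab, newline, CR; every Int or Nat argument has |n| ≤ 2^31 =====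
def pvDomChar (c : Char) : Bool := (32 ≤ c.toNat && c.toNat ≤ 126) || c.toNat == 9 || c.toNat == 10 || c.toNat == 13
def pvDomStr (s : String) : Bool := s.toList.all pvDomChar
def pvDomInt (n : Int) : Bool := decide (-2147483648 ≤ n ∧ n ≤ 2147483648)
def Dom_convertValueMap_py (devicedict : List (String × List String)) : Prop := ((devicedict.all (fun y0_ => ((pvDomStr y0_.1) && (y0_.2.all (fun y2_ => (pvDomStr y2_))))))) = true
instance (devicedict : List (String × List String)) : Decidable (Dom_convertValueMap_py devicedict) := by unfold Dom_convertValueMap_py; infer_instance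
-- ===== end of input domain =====

-- B replaces A's early-breaking index loop (building a partial dict discarded on break)
-- with a separate any-parses-as-int continuity test followed by a comprehension; objective: simpler.


-- ===== PORT A =====
-- inner loop: for i in range(len(states)): try int → break (none); except → d[s]=i
def cvmLoopA : List String → Int → PySem.Dict String Int → Option (PySem.Dict String Int)
  | [], _, d => some d
  | s :: rest, i, d =>
    match PySem.Int.ofStr? s with
    | some _ => none                                -- continuous = True; break
    | none => cvmLoopA rest (i + 1) (d.insert s i)  -- d[stateval] = i

def convertValueMap_py (devicedict : List (String × List String)) : List (String × List (String × Int)) :=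
  ((PySem.Dict.ofList devicedict).keys.foldl (fun vm dev =>
      match cvmLoopA ((PySem.Dict.ofList devicedict).getD dev []) 0 PySem.Dict.empty with
      | some d => vm.insert dev d.items
      | none => vm)
    (PySem.Dict.empty : PySem.Dict String (List (String × Int)))).items

-- ===== PORT B =====
def cvmIsInt (s : String) : Bool := (PySem.Int.ofStr? s).isSome

-- {s: i for i, s in enumerate(states)}
def cvmIndexMap (states : List String) : PySem.Dict String Int :=
  (PySem.List.enumerate states 0).foldl (fun d p => d.insert p.2 p.1) PySem.Dict.empty

def convertValueMap_py_alt (devicedict : List (String × List String)) : List (String × List (String × Int)) :=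
  ((PySem.Dict.ofList devicedict).keys.foldl (fun vm dev =>
      if ((PySem.Dict.ofList devicedict).getD dev []).any cvmIsInt then vm
      else vm.insert dev (cvmIndexMap ((PySem.Dict.ofList devicedict).getD dev [])).items)
    (PySem.Dict.empty : PySem.Dict String (List (String × Int)))).items

-- ===== PRECONDITION & SPEC =====
def Spec_convertValueMap_py (devicedict : List (String × List String)) (out : List (String × List (String × Int))) : Prop := out = convertValueMap_py_alt devicedict
instance (devicedict : List (String × List String)) (out : List (String × List (String × Int))) : Decidable (Spec_convertValueMap_py devicedict out) := by unfold Spec_convertValueMap_py; infer_instance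

-- ===== CLAIM (what is proved, stated in full; the proofs are below) =====
def Claim_equal_convertValueMap_py : Prop := ∀ (devicedict : List (String × List String)), Dom_convertValueMap_py devicedict → Spec_convertValueMap_py devicedict (convertValueMap_py devicedict)

-- ===== LEMMAS AND PROOFS =====

-- A's early-breaking loop equals B's any-test-then-build, for any start index and accumulator.
theorem cvmLoopA_eq (states : List String) : ∀ (i : Int) (d : PySem.Dict String Int),
    cvmLoopA states i d =
      if states.any cvmIsInt then none
      else some ((PySem.List.enumerate states i).foldl (fun d p => d.insert p.2 p.1) d) := by
  induction states with
  | nil => intro i d; simp [cvmLoopA, PySem.List.enumerate_nil]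
  | cons s rest ih =>
    intro i d
    simp only [cvmLoopA, List.any_cons, PySem.List.enumerate_cons, List.foldl_cons]
    cases h : PySem.Int.ofStr? s with
    | some v => simp [cvmIsInt, h]
    | none => simp [cvmIsInt, h, ih]

theorem convertValueMap_py_eq (devicedict : List (String × List String)) :
    convertValueMap_py devicedict = convertValueMap_py_alt devicedict := by
  unfold convertValueMap_py convertValueMap_py_alt
  congr 1
  apply PySem.List.foldl_congr_mem
  intro vm dev _
  rw [cvmLoopA_eq]
  by_cases h : (((PySem.Dict.ofList devicedict).getD dev []).any cvmIsInt) = true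
  · simp [h]
  · simp [h, cvmIndexMap]

-- ===== VERDICT (by name: the statement is the Claim_ definition above) =====
theorem convertValueMap_py_spec : Claim_equal_convertValueMap_py := by
  intro devicedict _
  exact convertValueMap_py_eq devicedict
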